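-- pv_equiv track=rewrite | github.com/burgshrimps/encorr | ENCORR_conn_stat.py | get_intensity_entries
-- ===== SOURCE A (Python) =====
-- def get_intensity_entries(phases):
--     intensity_entries = []
--     for p in phases:
--         if len(p) == 1:
--             if p[0]['IN'] == '.':
--                 intensity_entries.append(0)
--             else:
--                 intensity_entries.append(p[0]['IN'])
--         else:
--             peak_present = False
--             for conn in p:
--                 if conn['TP'] == 'PK':
--                     peak_present = True
--                     break
--             if peak_present:
--                 intensity_entries.append(max([c['IN'] for c in p]))
--             else:
--                 intensity_entries.append(min([c['IN'] for c in p]))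
--     return intensity_entries
-- ===== SOURCE B (Python) =====
-- def _phase_value(p):
--     if len(p) == 1:
--         return 0 if p[0]['IN'] == '.' else p[0]['IN']
--     peak = False
--     hi = lo = p[0]['IN']
--     for conn in p:
--         if conn.get('TP') == 'PK':
--             peak = True
--         v = conn['IN']
--         if hi < v:
--             hi = v
--         if v < lo:
--             lo = v
--     return hi if peak else lo
--
--
-- def get_intensity_entries(phases):
--     return [_phase_value(p) for p in phases]
-- ===== Notes on version B (the rewrite author's own statement) =====
-- stated objective: alternative
-- what changed: The multi-connection branch's break-scan for a peak plus two separate max/min comprehension passes are replaced by ONE pass over the connections maintaining (peak flag via conn.get('TP'), running max, running min).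
-- outside the precondition, e.g. on get_intensity_entries([[{'IN': '.'}]]): A returns [0], B returns [0]
import Mathlib
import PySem

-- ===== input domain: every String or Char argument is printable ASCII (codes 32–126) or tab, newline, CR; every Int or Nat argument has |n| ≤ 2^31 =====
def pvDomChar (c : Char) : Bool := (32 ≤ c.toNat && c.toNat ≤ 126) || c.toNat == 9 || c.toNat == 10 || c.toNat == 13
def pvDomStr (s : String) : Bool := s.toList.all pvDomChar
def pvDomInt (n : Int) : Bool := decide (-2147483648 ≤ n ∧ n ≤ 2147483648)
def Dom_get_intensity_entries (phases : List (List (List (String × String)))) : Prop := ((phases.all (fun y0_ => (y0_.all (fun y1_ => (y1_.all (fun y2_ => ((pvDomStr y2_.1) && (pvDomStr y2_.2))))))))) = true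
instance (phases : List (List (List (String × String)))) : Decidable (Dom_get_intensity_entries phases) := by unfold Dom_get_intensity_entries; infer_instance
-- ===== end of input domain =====

-- B replaces A's multi-connection branch (break-scan for a peak plus two full comprehension passes for max/min)
-- by ONE pass keeping (peak flag, running max, running min); return values agree on Pre_.

-- ===== PORT A =====
-- shared lookup helpers: conn['IN'] and the test conn['TP'] == 'PK' (default "" is exact: "" != "PK")
def pvIN (c : List (String × String)) : String := PySem.Dict.getD (PySem.Dict.mk c) "IN" ""

def pvTest (conn : List (String × String)) : Bool :=
  PySem.Dict.getD (PySem.Dict.mk conn) "TP" "" == "PK"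

-- loop body of A: one phase appended to the accumulated entries
def pvBodyA (intensity_entries : List String) (p : List (List (String × String))) : List String :=
  if p.length = 1 then
    -- Python appends the int 0 when IN == '.'; that input is outside Pre_ (the int 0 has no place in a List String); "" stands in
    if pvIN (p.headD []) = "." then
      intensity_entries ++ [""]
    else
      intensity_entries ++ [pvIN (p.headD [])]
  else
    -- the for/break scan setting peak_present; conn['TP'] ported with default "" ≠ "PK": exact inside Pre_,
    -- which guarantees the scan reaches no connection lacking 'TP' (a missing 'TP' there is A's KeyError)
    let peak_present := p.any (fun conn => pvTest conn)
    if peak_present then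
      intensity_entries ++
        [(PySem.List.max? (p.map (fun c => pvIN c)) (fun y => y)).getD ""]
    else
      intensity_entries ++
        [(PySem.List.min? (p.map (fun c => pvIN c)) (fun y => y)).getD ""]

def get_intensity_entries (phases : List (List (List (String × String)))) : List String :=
  phases.foldl pvBodyA []

-- ===== PORT B =====
-- per-phase helper of B: single pass keeping (peak flag, running max, running min)
def pvPhaseValueB (p : List (List (String × String))) : String :=
  if p.length = 1 then
    -- Python returns the int 0 when IN == '.'; outside Pre_; "" stands in (as in port A)
    if pvIN (p.headD []) = "."
    then "" else pvIN (p.headD [])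
  else
    -- conn.get('TP') == 'PK' ported as getD with default "": exact, since "" ≠ "PK"
    let st :=
      p.foldl
        (fun (st : Bool × String × String) conn =>
          (if pvTest conn then true else st.1,
           if st.2.1 < pvIN conn
             then pvIN conn else st.2.1,
           if pvIN conn < st.2.2
             then pvIN conn else st.2.2))
        (false, pvIN (p.headD []),
                pvIN (p.headD []))
    if st.1 then st.2.1 else st.2.2

def get_intensity_entries_alt (phases : List (List (List (String × String)))) : List String :=
  phases.map pvPhaseValueB

-- ===== PRECONDITION & SPEC =====
-- Pre_ excludes exactly (a) the inputs where Python A raises: an empty phase (ValueError from min/max of []),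
-- a connection without 'IN' (KeyError), or a multi-connection phase whose break-scan reaches a connection
-- without 'TP' — i.e. one not preceded by a 'PK' — (KeyError); and (b) singleton phases with IN == '.',
-- where A appends the Python int 0, a value outside the declared return type List String and hence
-- unrepresentable in a faithful port (Python B returns the identical [0] there).
def Pre_get_intensity_entries (phases : List (List (List (String × String)))) : Prop :=
  ∀ p ∈ phases, p ≠ [] ∧
    (if p.length = 1 then
        (PySem.Dict.mk (p.headD [])).contains "IN" = true ∧
        pvIN (p.headD []) ≠ "."
      else
        (∀ c ∈ p, (PySem.Dict.mk c).contains "IN" = true) ∧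
        ∀ j < p.length, (PySem.Dict.mk (p.getD j [])).contains "TP" = false →
          ∃ i < j, PySem.Dict.getD (PySem.Dict.mk (p.getD i [])) "TP" "" = "PK")
instance (phases : List (List (List (String × String)))) : Decidable (Pre_get_intensity_entries phases) := by
  unfold Pre_get_intensity_entries; infer_instance

def pvWitness_get_intensity_entries : (List (List (List (String × String)))) :=
  [[[("IN", "3"), ("TP", "PK")], [("IN", "5"), ("TP", "UP")]], [[("IN", "7")]]]

def Spec_get_intensity_entries (phases : List (List (List (String × String)))) (out : List String) : Prop := out = get_intensity_entries_alt phases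
instance (phases : List (List (List (String × String)))) (out : List String) : Decidable (Spec_get_intensity_entries phases out) := by unfold Spec_get_intensity_entries; infer_instance

-- ===== CLAIM (what is proved, stated in full; the proofs are below) =====
def Claim_equal_get_intensity_entries : Prop := ∀ (phases : List (List (List (String × String)))), Dom_get_intensity_entries phases → Pre_get_intensity_entries phases → Spec_get_intensity_entries phases (get_intensity_entries phases)

-- ===== LEMMAS AND PROOFS =====

-- A's per-phase value
def pvFA (p : List (List (String × String))) : String :=
  if p.length = 1 then
    (if pvIN (p.headD []) = "." then "" else pvIN (p.headD []))
  else if p.any pvTest then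
    (PySem.List.max? (p.map pvIN) (fun y => y)).getD ""
  else
    (PySem.List.min? (p.map pvIN) (fun y => y)).getD ""

lemma bodyA_eq (acc : List String) (p : List (List (String × String))) :
    pvBodyA acc p = acc ++ [pvFA p] := by
  unfold pvBodyA pvFA
  split_ifs with h1 h2 h3
  · rfl
  · rfl
  · simp [h3]
  · simp [h3]

lemma A_eq_map (phases : List (List (List (String × String)))) :
    get_intensity_entries phases = phases.map pvFA := by
  unfold get_intensity_entries
  rw [PySem.List.foldl_congr_mem (l := phases) (init := ([] : List String))
      (f := pvBodyA) (g := fun acc p => acc ++ [pvFA p]) (fun acc p _ => bodyA_eq acc p)]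
  simpa using PySem.List.foldl_append_singleton_eq_map pvFA phases []

lemma hi_step (a b : String) : (if a < b then b else a) = max a b := by
  by_cases h : a < b
  · simp [h, max_eq_right h.le]
  · simp [h, max_eq_left (not_lt.1 h)]

lemma lo_step (a b : String) : (if b < a then b else a) = min a b := by
  by_cases h : b < a
  · simp [h, min_eq_right h.le]
  · simp [h, min_eq_left (not_lt.1 h)]

-- B's combined loop state, closed form
lemma st_fold (l : List (List (String × String))) (b : Bool) (hi lo : String) :
    l.foldl
        (fun (st : Bool × String × String) conn =>
          (if pvTest conn then true else st.1,
           if st.2.1 < pvIN conn then pvIN conn else st.2.1,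
           if pvIN conn < st.2.2 then pvIN conn else st.2.2))
        (b, hi, lo)
      = (b || l.any pvTest, (l.map pvIN).foldl max hi, (l.map pvIN).foldl min lo) := by
  induction l generalizing b hi lo with
  | nil => simp
  | cons c t ih =>
    simp only [List.foldl_cons]
    rw [ih, hi_step, lo_step]
    simp only [List.any_cons, List.map_cons, List.foldl_cons]
    cases htest : pvTest c <;> simp

lemma phase_eq (p : List (List (String × String))) (hp : p ≠ []) :
    pvFA p = pvPhaseValueB p := by
  obtain ⟨c, rest, rfl⟩ := List.exists_cons_of_ne_nil hp
  by_cases h1 : (c :: rest).length = 1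
  · unfold pvFA pvPhaseValueB; simp [h1]
  · unfold pvFA pvPhaseValueB
    rw [if_neg h1, if_neg h1, st_fold]
    simp only [Bool.false_or, List.headD_cons, List.map_cons, List.foldl_cons, max_self, min_self]
    split_ifs with hpk
    · rw [PySem.List.max?_id_cons]; rfl
    · rw [PySem.List.min?_id_cons]; rfl

-- ===== VERDICT (by name: the statement is the Claim_ definition above) =====
theorem get_intensity_entries_spec : Claim_equal_get_intensity_entries := by
  intro phases _ hpre
  unfold Spec_get_intensity_entries
  rw [A_eq_map]
  unfold get_intensity_entries_alt
  exact List.map_congr_left (fun p hp => phase_eq p (hpre p hp).1)
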